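-- pv_equiv track=rewrite | github.com/rahul-go/Introduction-to-Software-Engineering | assignment5-tdd/greet.py | greet_styled
-- ===== SOURCE A (Python) =====
-- def greet_styled(names, hello, conj, punc):
--     if len(names) == 0:
--         return ""
--     if len(names) == 1:
--         return f"{hello} {names[0]}{punc}"
--     if len(names) == 2:
--         return f"{hello} {names[0]} {conj} {names[1]}{punc}"
--
--     result = f"{hello} "
--     for i in range(len(names) - 1):
--         result += f"{names[i]}, "
--     result += f"{conj} {names[len(names) - 1]}{punc}"
--     return result
-- ===== SOURCE B (Python) =====
-- def greet_styled(names, hello, conj, punc):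
--     if not names:
--         return ""
--     *front, last = names
--     words = [hello]
--     words += [w + "," for w in front] if len(names) > 2 else front
--     if front:
--         words.append(conj)
--     words.append(last + punc)
--     return " ".join(words)
-- ===== Notes on version B (the rewrite author's own statement) =====
-- stated objective: alternative
-- what changed: B builds an intermediate list of whitespace-free tokens (hello, each middle name with a trailing comma when >2 names, the conjunction, last name + punctuation) and emits the result with a single ' '.join, replacing A's branchwise f-string concatenation and index loop.
import Mathlib
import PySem

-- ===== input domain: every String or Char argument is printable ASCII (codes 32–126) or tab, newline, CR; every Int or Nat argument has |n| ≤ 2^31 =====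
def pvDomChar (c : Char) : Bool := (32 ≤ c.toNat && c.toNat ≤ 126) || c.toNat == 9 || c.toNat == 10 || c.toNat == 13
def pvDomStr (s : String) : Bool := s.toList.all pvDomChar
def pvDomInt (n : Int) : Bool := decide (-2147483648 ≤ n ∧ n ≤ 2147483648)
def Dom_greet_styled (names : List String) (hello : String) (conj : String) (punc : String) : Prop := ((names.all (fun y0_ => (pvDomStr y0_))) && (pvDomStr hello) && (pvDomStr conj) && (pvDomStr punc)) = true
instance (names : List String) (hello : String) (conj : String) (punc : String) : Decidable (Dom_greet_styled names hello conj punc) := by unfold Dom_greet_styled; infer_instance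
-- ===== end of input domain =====

-- B builds a list of whitespace-free tokens and emits it with one " ".join, replacing
-- A's branchwise f-string concatenation and index loop (objective: alternative).
-- Strings are built on List Char (PySem.Chars) and packed with String.ofList,
-- since Lean's String.append is kernel-opaque.

-- ===== PORT A =====
def greet_styled (names : List String) (hello : String) (conj : String) (punc : String) : String :=
  if names.length = 0 then ""
  else if names.length = 1 then
    String.ofList (hello.toList ++ [' '] ++ (PySem.List.pyGetD names 0 "").toList ++ punc.toList)
  else if names.length = 2 then
    String.ofList (hello.toList ++ [' '] ++ (PySem.List.pyGetD names 0 "").toList ++ [' ']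
      ++ conj.toList ++ [' '] ++ (PySem.List.pyGetD names 1 "").toList ++ punc.toList)
  else
    -- result = f"{hello} "; for i in range(len(names) - 1): result += f"{names[i]}, "
    let result := (PySem.List.pyRange 0 ((names.length : Int) - 1) 1).foldl
      (fun acc i => acc ++ (PySem.List.pyGetD names i "").toList ++ [',', ' '])
      (hello.toList ++ [' '])
    String.ofList (result ++ conj.toList ++ [' ']
      ++ (PySem.List.pyGetD names ((names.length : Int) - 1) "").toList ++ punc.toList)

-- ===== PORT B =====
def greet_styled_alt (names : List String) (hello : String) (conj : String) (punc : String) : String :=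
  if names.length = 0 then ""
  else
    -- *front, last = names
    let front := names.dropLast
    let last := names.getLastD ""
    -- words = [hello]; words += [w + "," for w in front] if len(names) > 2 else front
    let mids : List (List Char) :=
      if 2 < names.length then front.map (fun w => w.toList ++ [','])
      else front.map String.toList
    -- if front: words.append(conj)
    -- words.append(last + punc); return " ".join(words)
    let words : List (List Char) :=
      [hello.toList] ++ mids ++ (if front = [] then [] else [conj.toList])
        ++ [last.toList ++ punc.toList]
    String.ofList (PySem.Chars.join [' '] words)

-- ===== PRECONDITION & SPEC =====
def Spec_greet_styled (names : List String) (hello : String) (conj : String) (punc : String) (out : String) : Prop := out = greet_styled_alt names hello conj punc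
instance (names : List String) (hello : String) (conj : String) (punc : String) (out : String) : Decidable (Spec_greet_styled names hello conj punc out) := by unfold Spec_greet_styled; infer_instance

-- ===== CLAIM (what is proved, stated in full; the proofs are below) =====
def Claim_equal_greet_styled : Prop := ∀ (names : List String) (hello : String) (conj : String) (punc : String), Dom_greet_styled names hello conj punc → Spec_greet_styled names hello conj punc (greet_styled names hello conj punc)

-- ===== LEMMAS AND PROOFS =====

-- joining a list split as ms ++ ts (ts nonempty): each m of ms contributes m ++ sep
lemma join_append_sep (sep : List Char) (ms ts : List (List Char)) (h : ts ≠ []) :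
    PySem.Chars.join sep (ms ++ ts)
      = List.flatMap (fun m => m ++ sep) ms ++ PySem.Chars.join sep ts := by
  induction ms with
  | nil => simp
  | cons a r ih =>
    have hne : r ++ ts ≠ [] := by
      cases ts with
      | nil => exact absurd rfl h
      | cons b t => simp
    rcases List.exists_cons_of_ne_nil hne with ⟨b, t, hbt⟩
    rw [List.cons_append, hbt, PySem.Chars.join_cons_cons, ← hbt, ih]
    simp

-- A's index loop over range(len(names)-1) is a flatMap over names.dropLast
lemma loopA_eq (names : List String) (init : List Char) :
    (PySem.List.pyRange 0 ((names.length : Int) - 1) 1).foldl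
      (fun acc i => acc ++ (PySem.List.pyGetD names i "").toList ++ [',', ' ']) init
      = init ++ List.flatMap (fun s => s.toList ++ [',', ' ']) names.dropLast := by
  have hlen : ((names.dropLast.length : Int)) = (names.length : Int) - 1 ∨ names = [] := by
    cases names with
    | nil => right; rfl
    | cons a t => left; simp [List.length_dropLast]
  rcases hlen with hlen | rfl
  · rw [← hlen]
    have hcongr : (PySem.List.pyRange 0 ((names.dropLast.length : Int)) 1).foldl
        (fun acc i => acc ++ (PySem.List.pyGetD names i "").toList ++ [',', ' ']) init
        = (PySem.List.pyRange 0 ((names.dropLast.length : Int)) 1).foldl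
        (fun acc i => acc ++ (PySem.List.pyGetD names.dropLast i "").toList ++ [',', ' ']) init := by
      apply PySem.List.foldl_congr_mem
      intro acc i hi
      rw [PySem.List.mem_pyRange_one] at hi
      have h0 : 0 ≤ i := hi.1
      have h1 : i < (names.dropLast.length : Int) := hi.2
      have h1n : i.toNat < names.dropLast.length := by omega
      have h1' : i < names.length := by
        have hdl : names.dropLast.length = names.length - 1 := List.length_dropLast
        omega
      rw [PySem.List.pyGetD_eq_getElem names "" h0 (by exact_mod_cast h1'),
          PySem.List.pyGetD_eq_getElem names.dropLast "" h0 (by exact_mod_cast h1)]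
      congr 3
      exact (List.getElem_dropLast (xs := names) (i := i.toNat) h1n).symm
    rw [hcongr]
    have := PySem.List.foldl_pyRange_zero_pyGetD names.dropLast ""
      (fun acc (s : String) => acc ++ (s.toList ++ [',', ' '])) init
    simp only [PySem.List.len_eq, List.append_assoc] at this ⊢
    rw [this]
    exact PySem.List.foldl_append_eq_flatMap (fun s => s.toList ++ [',', ' ']) names.dropLast init
  · simp [PySem.List.pyRange_one_eq_nil]

-- ===== VERDICT (by name: the statement is the Claim_ definition above) =====
theorem greet_styled_spec : Claim_equal_greet_styled := by
  intro names hello conj punc _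
  unfold Spec_greet_styled greet_styled greet_styled_alt
  match names with
  | [] => rfl
  | [a] =>
    simp [PySem.Chars.join_cons_cons, PySem.Chars.join_singleton, PySem.List.pyGetD,
      PySem.List.pyGet?, PySem.List.pyIdx?]
  | [a, b] =>
    simp [PySem.Chars.join_cons_cons, PySem.Chars.join_singleton, PySem.List.pyGetD,
      PySem.List.pyGet?, PySem.List.pyIdx?]
  | a :: b :: c :: rest =>
    set ns := a :: b :: c :: rest with hns
    have h3 : 3 ≤ ns.length := by simp [hns]
    have h0 : ¬ ns.length = 0 := by omega
    have h1 : ¬ ns.length = 1 := by omega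
    have h2 : ¬ ns.length = 2 := by omega
    have h2' : 2 < ns.length := by omega
    have hfr : ns.dropLast ≠ [] := by
      have : ns.dropLast.length = ns.length - 1 := List.length_dropLast
      intro hcon; rw [hcon] at this; simp at this; omega
    simp only [h0, h1, h2, if_false, if_pos h2', if_neg hfr]
    rw [loopA_eq]
    -- unfold B's join
    rw [show [hello.toList] ++ ns.dropLast.map (fun w => w.toList ++ [','])
          ++ [conj.toList] ++ [(ns.getLastD "").toList ++ punc.toList]
        = ([hello.toList] ++ ns.dropLast.map (fun w => w.toList ++ [',']))
          ++ ([conj.toList] ++ [(ns.getLastD "").toList ++ punc.toList]) by simp]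
    rw [join_append_sep [' '] _ _ (by simp)]
    simp only [List.cons_append, List.nil_append]
    rw [PySem.Chars.join_cons_cons, PySem.Chars.join_singleton]
    have hlast : PySem.List.pyGetD ns ((ns.length : Int) - 1) "" = ns.getLastD "" := by
      have hnz : ns ≠ [] := by simp [hns]
      rw [PySem.List.pyGetD_eq_getElem ns "" (by omega) (by omega)]
      have ht : ((ns.length : Int) - 1).toNat = ns.length - 1 := by omega
      rw [List.getLastD_eq_getLast?, List.getLast?_eq_some_getLast hnz,
          List.getLast_eq_getElem]
      simp only [ht]
      rfl
    rw [hlast]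
    have hbody : List.flatMap (fun m => m ++ [' ']) (ns.dropLast.map (fun w => w.toList ++ [',']))
        = List.flatMap (fun s => s.toList ++ [',', ' ']) ns.dropLast := by
      rw [List.flatMap_map]
      simp
    simp only [List.flatMap_cons, hbody,
      List.append_assoc, List.cons_append, List.nil_append]
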